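-- pv_equiv track=rewrite | github.com/gudusol/algorithm | 백준/Gold/9527. 1의 개수 세기/1의 개수 세기.py | count
-- ===== SOURCE A (Python) =====
-- def count(num):
--     binary = bin(num)[2:]
--     ans = 0
--     length = len(binary)
--     count_one = 0
--
--     for idx in range(length - 1):
--         if binary[idx] == "1":
--             x = length - idx - 1
--             ans += 2 ** (x - 1) * x + 1
--             ans += count_one * 2**x
--             count_one += 1
--     ans += int(binary[-1]) * (count_one + 1)
--     return ans
-- ===== SOURCE B (Python) =====
-- def count(num):
--     # per-bit closed form: for each bit i, count how many k in [0, num] have bit i set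
--     total = 0
--     i = 0
--     while 2 ** i <= num:
--         block = 2 ** (i + 1)
--         total += (num + 1) // block * 2 ** i + max(0, (num + 1) % block - 2 ** i)
--         i += 1
--     return total
-- ===== Notes on version B (the rewrite author's own statement) =====
-- stated objective: alternative
-- what changed: Replaces the MSB-to-LSB scan of bin(num)'s digit string (threading a running count of 1-bits seen so far) by an independent per-bit closed-form count of integers in [0,num] with bit i set, summed over bit positions.
-- outside the precondition, e.g. on count(-5): A returns 7, B returns 0; on count(-1): A returns 1, B returns 0
import Mathlib
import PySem

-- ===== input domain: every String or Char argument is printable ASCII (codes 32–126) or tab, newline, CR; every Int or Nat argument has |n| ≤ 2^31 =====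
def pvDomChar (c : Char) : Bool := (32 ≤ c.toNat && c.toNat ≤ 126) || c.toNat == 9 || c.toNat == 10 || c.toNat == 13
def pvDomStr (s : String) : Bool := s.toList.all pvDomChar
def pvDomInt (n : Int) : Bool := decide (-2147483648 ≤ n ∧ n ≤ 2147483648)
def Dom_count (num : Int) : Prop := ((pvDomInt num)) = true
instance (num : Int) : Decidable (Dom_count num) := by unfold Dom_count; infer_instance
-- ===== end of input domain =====

-- B replaces A's MSB-to-LSB scan of bin(num)'s digit string (threading a running count of
-- previously seen 1-bits) by an independent per-bit closed-form count, summed over bit positions.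

-- ===== PORT A =====
-- loop body of A's 'for idx in range(length - 1)' (binary and its length are captured);
-- pyGetD with a default is exact here: idx is always in range; exponents (x-1), x are ≥ 0 whenever the branch runs
def countBody (binary : List Char) (s : Int × Int) (idx : Int) : Int × Int :=
  if PySem.List.pyGetD binary idx ' ' = '1' then
    let x : Int := (binary.length : Int) - idx - 1
    (s.1 + (2 ^ (x - 1).toNat * x + 1) + s.2 * 2 ^ x.toNat, s.2 + 1)
  else s

-- bin(num)[2:] is ported as .toList.drop 2 (slice with nonnegative start and no stop = drop);
-- int(binary[-1]) as ofChars? of the last char (always a digit, so the .getD 0 default is never used)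
def count (num : Int) : Int :=
  let binary : List Char := (PySem.Int.pyBin num).toList.drop 2
  let length : Int := (binary.length : Int)
  let s := (PySem.List.pyRange 0 (length - 1) 1).foldl (countBody binary) (0, 0)
  s.1 + (PySem.Int.ofChars? [PySem.List.pyGetD binary (-1) ' ']).getD 0 * (s.2 + 1)

-- ===== PORT B =====
-- the 'while 2 ** i <= num' loop of Source B; i only ever takes nonnegative values, so it is a Nat
def altGo (num : Int) (i : Nat) (total : Int) : Int :=
  if h : (2 : Int) ^ i ≤ num then
    altGo num (i + 1)
      (total + PySem.Int.floordiv (num + 1) (2 ^ (i + 1)) * 2 ^ i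
             + max 0 (PySem.Int.mod (num + 1) (2 ^ (i + 1)) - 2 ^ i))
  else total
termination_by (num + 1 - 2 ^ i).toNat
decreasing_by
  have h1 : (1 : Int) ≤ 2 ^ i := one_le_pow₀ (by norm_num)
  have h2 : (2 : Int) ^ (i + 1) = 2 * 2 ^ i := by ring
  have h3 := h
  omega

def count_alt (num : Int) : Int := altGo num 0 0

-- ===== PRECONDITION & SPEC =====
-- Pre_ excludes negative num, on which A's string slicing of bin(num) scans the leftover 'b'
-- of the '-0b' prefix and returns an accidental value for a meaningless query; B's loop body never runs there.
def Pre_count (num : Int) : Prop := 0 ≤ num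
instance (num : Int) : Decidable (Pre_count num) := by unfold Pre_count; infer_instance
def pvWitness_count : Int := 5

def Spec_count (num : Int) (out : Int) : Prop := out = count_alt num
instance (num : Int) (out : Int) : Decidable (Spec_count num out) := by unfold Spec_count; infer_instance

-- ===== CLAIM (what is proved, stated in full; the proofs are below) =====
def Claim_equal_count : Prop := ∀ (num : Int), Dom_count num → Pre_count num → Spec_count num (count num)

-- ===== LEMMAS AND PROOFS =====

-- popcount of n, as the digit sum of its binary digit expansion
def pc (n : Nat) : Nat := (Nat.digits 2 n).sum
-- the common specification value: total popcount of 0..n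
def Spop (n : Nat) : Int := ∑ k ∈ Finset.range (n + 1), (pc k : Int)
-- the binary digit string of n (MSB first), as the char list A iterates over
def bl (n : Nat) : List Char := ((Nat.digits 2 n).map Nat.digitChar).reverse

-- ----- A-side: structural versions of A's loop -----
-- A's loop (which skips the final digit), as structural recursion over the digit list
def gA : List Char → Int × Int → Int × Int
  | [], s => s
  | [_], s => s
  | d :: rest, s =>
      gA rest (if d = '1'
        then (s.1 + (2 ^ (rest.length - 1) * (rest.length : Int) + 1) + s.2 * 2 ^ rest.length, s.2 + 1)
        else s)

-- A's loop with the final 'ans += int(binary[-1]) * (count_one + 1)' merged into the last step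
def loopA : List Char → Int × Int → Int × Int
  | [], s => s
  | [d], s => (s.1 + (if d = '1' then 1 else 0) * (s.2 + 1), s.2)
  | d :: rest, s =>
      loopA rest (if d = '1'
        then (s.1 + (2 ^ (rest.length - 1) * (rest.length : Int) + 1) + s.2 * 2 ^ rest.length, s.2 + 1)
        else s)

-- numeric value of the digit string, count of '1's, and count of '1's excluding the last digit
def vl : List Char → Int
  | [] => 0
  | d :: rest => (if d = '1' then 2 ^ rest.length else 0) + vl rest
def pcA : List Char → Int
  | [] => 0
  | d :: rest => (if d = '1' then 1 else 0) + pcA rest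
def pcD : List Char → Int
  | [] => 0
  | [_] => 0
  | d :: rest => (if d = '1' then 1 else 0) + pcD rest

-- ----- B-side: per-bit Nat counting function -----
-- number of k < M whose bit e is set (Nat subtraction realises the max(0, ...))
def g (M e : Nat) : Nat := M / 2 ^ (e + 1) * 2 ^ e + (M % 2 ^ (e + 1) - 2 ^ e)

theorem toDigitsCore_eq (n : Nat) (hn : 0 < n) :
    ∀ (f : Nat) (ds : List Char), n < f →
      Nat.toDigitsCore 2 f n ds = ((Nat.digits 2 n).map Nat.digitChar).reverse ++ ds := by
  induction n using Nat.strong_induction_on with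
  | _ n ih =>
    intro f ds hf
    cases f with
    | zero => omega
    | succ f =>
      simp only [Nat.toDigitsCore]
      by_cases h2 : n / 2 = 0
      · have hn1 : n = 1 := by omega
        subst hn1
        rw [if_pos h2, Nat.digits_def' (by norm_num : 1 < 2) (by norm_num)]
        simp
      · rw [if_neg h2]
        rw [ih (n / 2) (Nat.div_lt_self hn (by norm_num)) (by omega) f _ (by omega)]
        rw [Nat.digits_def' (by norm_num : 1 < 2) hn]
        simp

theorem toDigits_eq (n : Nat) (hn : 0 < n) : Nat.toDigits 2 n = bl n := by
  have := toDigitsCore_eq n hn (n + 1) [] (by omega)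
  simpa [Nat.toDigits, bl] using this

theorem countBody_natCast (e : List Char) (s : Int × Int) (k : Nat) :
    countBody e s (k : Int)
      = if e.getD k ' ' = '1'
          then (s.1 + (2 ^ (e.length - k - 1 - 1) * ((e.length - k - 1 : Nat) : Int) + 1)
                  + s.2 * 2 ^ (e.length - k - 1), s.2 + 1)
          else s := by
  simp only [countBody, PySem.List.pyGetD_natCast]
  have h1 : ((e.length : Int) - (k : Int) - 1 - 1).toNat = e.length - k - 1 - 1 := by omega
  have h2 : ((e.length : Int) - (k : Int) - 1).toNat = e.length - k - 1 := by omega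
  by_cases hk : k < e.length
  · have h3 : ((e.length : Int) - (k : Int) - 1) = ((e.length - k - 1 : Nat) : Int) := by omega
    rw [h1, h2, h3]
  · have hget : e.getD k ' ' = ' ' := List.getD_eq_default _ _ (by omega)
    rw [hget, if_neg (by decide : ¬(' ' = '1')), if_neg (by decide : ¬(' ' = '1'))]

theorem foldN_eq_gA (e : List Char) :
    ∀ s : Int × Int,
      (List.range (e.length - 1)).foldl (fun s (k : Nat) => countBody e s (k : Int)) s = gA e s := by
  induction e with
  | nil => intro s; simp [gA]
  | cons d rest ih =>
    intro s
    cases rest with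
    | nil => simp [gA]
    | cons r rs =>
      have hlen : (d :: r :: rs : List Char).length - 1 = ((r :: rs : List Char).length - 1) + 1 := by
        simp
      rw [hlen, List.range_succ_eq_map, List.foldl_cons, List.foldl_map]
      have hb : (fun (s : Int × Int) (k : Nat) => countBody (d :: r :: rs) s ((k.succ : Nat) : Int))
          = (fun (s : Int × Int) (k : Nat) => countBody (r :: rs) s ((k : Nat) : Int)) := by
        funext s k
        rw [countBody_natCast, countBody_natCast]
        simp only [List.getD_cons_succ, List.length_cons]
        have h4 : rs.length + 1 + 1 - (k + 1) - 1 = rs.length + 1 - k - 1 := by omega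
        rw [h4]
      rw [hb, ih]
      have hstep : countBody (d :: r :: rs) s ((0 : Nat) : Int)
          = (if d = '1'
              then (s.1 + (2 ^ ((r :: rs : List Char).length - 1) * (((r :: rs : List Char).length : Nat) : Int) + 1)
                      + s.2 * 2 ^ (r :: rs : List Char).length, s.2 + 1)
              else s) := by
        rw [countBody_natCast]
        simp
      rw [hstep]
      rfl

theorem fold_eq_gA (e : List Char) (s : Int × Int) :
    (PySem.List.pyRange 0 ((e.length : Int) - 1) 1).foldl (countBody e) s = gA e s := by
  have h0 : ((e.length : Int) - 1 - 0).toNat = e.length - 1 := by omega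
  rw [PySem.List.pyRange_one, h0, List.foldl_map]
  have hb : (fun (s : Int × Int) (k : Nat) => countBody e s (0 + (k : Int)))
      = (fun (s : Int × Int) (k : Nat) => countBody e s (k : Int)) := by
    funext s k; rw [zero_add]
  rw [hb, foldN_eq_gA]

theorem loopA_merge (e : List Char) (he : e ≠ []) (s : Int × Int) :
    loopA e s = ((gA e s).1 + (if e.getLast? = some '1' then 1 else 0) * ((gA e s).2 + 1), (gA e s).2) := by
  induction e generalizing s with
  | nil => exact absurd rfl he
  | cons d rest ih =>
    cases rest with
    | nil =>
      simp only [loopA, gA, List.getLast?_singleton]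
      by_cases hd : d = '1' <;> simp [hd]
    | cons r rs =>
      simp only [loopA, gA, List.getLast?_cons_cons]
      rw [ih (by simp)]

theorem loopA_char (e : List Char) (s : Int × Int) :
    loopA e s = (s.1 + (loopA e (0, 0)).1 + s.2 * vl e, s.2 + pcD e) := by
  induction e generalizing s with
  | nil => simp [loopA, vl, pcD]
  | cons d rest ih =>
    cases rest with
    | nil =>
      simp only [loopA, vl, pcD]
      by_cases hd : d = '1' <;> simp [hd, Prod.ext_iff] <;> ring
    | cons r rs =>
      have hstep : ∀ t : Int × Int, loopA (d :: r :: rs) t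
          = loopA (r :: rs) (if d = '1'
              then (t.1 + (2 ^ ((r :: rs : List Char).length - 1) * (((r :: rs : List Char).length : Nat) : Int) + 1)
                      + t.2 * 2 ^ (r :: rs : List Char).length, t.2 + 1)
              else t) := fun t => rfl
      conv_lhs => rw [hstep, ih]
      conv_rhs => rw [hstep, ih]
      by_cases hd : d = '1' <;>
        simp only [hd, vl, pcD, Prod.mk.injEq, List.length_cons] <;>
        constructor <;> simp <;> ring

theorem vl_append (e : List Char) (b' : Char) :
    vl (e ++ [b']) = 2 * vl e + (if b' = '1' then 1 else 0) := by
  induction e with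
  | nil => simp [vl]
  | cons d rest ih =>
    simp only [List.cons_append, vl, ih, List.length_append, List.length_cons]
    by_cases hd : d = '1' <;> simp [hd] <;> ring

theorem pcA_append (e : List Char) (b' : Char) :
    pcA (e ++ [b']) = pcA e + (if b' = '1' then 1 else 0) := by
  induction e with
  | nil => simp [pcA]
  | cons d rest ih =>
    simp only [List.cons_append, pcA, ih]
    ring

theorem loopA_append (e : List Char) (he : e ≠ []) (b' : Char) :
    (loopA (e ++ [b']) (0, 0)).1
      = 2 * (loopA e (0, 0)).1 + vl e - pcA e + (if b' = '1' then 1 else 0) * (pcA e + 1) := by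
  induction e with
  | nil => exact absurd rfl he
  | cons d rest ih =>
    cases rest with
    | nil =>
      show (loopA [d, b'] (0, 0)).1 = _
      have h1 : loopA [d, b'] ((0 : Int), (0 : Int))
          = loopA [b'] (if d = '1'
              then ((0 : Int) + (2 ^ (([b'] : List Char).length - 1) * ((([b'] : List Char).length : Nat) : Int) + 1)
                      + (0 : Int) * 2 ^ ([b'] : List Char).length, (0 : Int) + 1)
              else ((0 : Int), (0 : Int))) := rfl
      rw [h1]
      by_cases hd : d = '1' <;> by_cases hb : b' = '1' <;>
        simp [hd, hb, loopA, vl, pcA] <;> ring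
    | cons r rs =>
      have hne : (r :: rs : List Char) ≠ [] := by simp
      have hstep : ∀ (u : List Char) (t : Int × Int), loopA (d :: r :: u) t
          = loopA (r :: u) (if d = '1'
              then (t.1 + (2 ^ ((r :: u : List Char).length - 1) * (((r :: u : List Char).length : Nat) : Int) + 1)
                      + t.2 * 2 ^ (r :: u : List Char).length, t.2 + 1)
              else t) := fun u t => rfl
      show (loopA (d :: r :: (rs ++ [b'])) (0, 0)).1 = _
      rw [hstep, hstep]
      rw [loopA_char (r :: (rs ++ [b'])), loopA_char (r :: rs)]
      have hA : (loopA (r :: (rs ++ [b'])) ((0 : Int), (0 : Int))).1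
          = (loopA ((r :: rs) ++ [b']) ((0 : Int), (0 : Int))).1 := rfl
      rw [hA, ih hne]
      have hv : vl (r :: (rs ++ [b'])) = vl ((r :: rs) ++ [b']) := rfl
      rw [hv, vl_append]
      by_cases hd : d = '1' <;> by_cases hb : b' = '1' <;>
        simp [hd, hb, vl, pcA] <;> push_cast <;> ring

theorem pc_rec (n : Nat) (hn : 0 < n) : pc n = n % 2 + pc (n / 2) := by
  unfold pc
  rw [Nat.digits_def' (by norm_num : 1 < 2) hn]
  simp

theorem Spop_succ (k : Nat) : Spop (k + 1) = Spop k + pc (k + 1) := by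
  unfold Spop
  rw [Finset.sum_range_succ]

theorem pc_even (k : Nat) (hk : 0 < k) : pc (2 * k) = pc k := by
  have h := pc_rec (2 * k) (by omega)
  have h1 : 2 * k % 2 = 0 := by omega
  have h2 : 2 * k / 2 = k := by omega
  rw [h, h1, h2]
  omega

theorem pc_odd (k : Nat) : pc (2 * k + 1) = 1 + pc k := by
  have := pc_rec (2 * k + 1) (by omega)
  rw [this]
  have h1 : (2 * k + 1) % 2 = 1 := by omega
  have h2 : (2 * k + 1) / 2 = k := by omega
  rw [h1, h2]

theorem pc_zero : pc 0 = 0 := by simp [pc]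

theorem pc_one : pc 1 = 1 := by simp [pc]

theorem Spop_odd (m : Nat) : Spop (2 * m + 1) = 2 * Spop m + (m + 1) := by
  induction m with
  | zero =>
    simp [Spop, Finset.sum_range_succ, pc_zero, pc_one]
  | succ m ih =>
    have h1 : 2 * (m + 1) + 1 = (2 * m + 1) + 1 + 1 := by ring
    rw [h1, Spop_succ, Spop_succ, ih]
    have h2 : (2 * m + 1) + 1 = 2 * (m + 1) := by ring
    have h3 : (2 * m + 1) + 1 + 1 = 2 * (m + 1) + 1 := by ring
    rw [h2, pc_even (m + 1) (by omega), pc_odd (m + 1), Spop_succ]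
    push_cast
    ring

theorem Spop_even (m : Nat) : Spop (2 * m) = 2 * Spop m + m - pc m := by
  have h1 : Spop (2 * m + 1) = Spop (2 * m) + pc (2 * m + 1) := Spop_succ (2 * m)
  have h2 := Spop_odd m
  rw [pc_odd m] at h1
  push_cast at h1 ⊢
  omega

theorem Spop_step (m b : Nat) (hb : b < 2) :
    Spop (2 * m + b) = 2 * Spop m + m - pc m + b * (pc m + 1) := by
  interval_cases b
  · simpa using Spop_even m
  · rw [Spop_odd m]
    push_cast
    ring

theorem bl_step (n : Nat) (hn : 2 ≤ n) : bl n = bl (n / 2) ++ [Nat.digitChar (n % 2)] := by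
  unfold bl
  rw [Nat.digits_def' (by norm_num : 1 < 2) (by omega)]
  simp

theorem bl_ne (n : Nat) (hn : 0 < n) : bl n ≠ [] := by
  unfold bl
  simp [Nat.digits_ne_nil_iff_ne_zero]
  omega

theorem digits_one : Nat.digits 2 1 = [1] := by decide

theorem bl_one : bl 1 = ['1'] := by
  unfold bl
  rw [digits_one]
  rfl

theorem vl_bl (n : Nat) (hn : 0 < n) : vl (bl n) = n := by
  induction n using Nat.strong_induction_on with
  | _ n ih =>
    by_cases h1 : n = 1
    · subst h1
      rw [bl_one]
      simp [vl]
    · rw [bl_step n (by omega), vl_append, ih (n / 2) (by omega) (by omega)]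
      rcases Nat.mod_two_eq_zero_or_one n with h | h <;> rw [h]
      · rw [show Nat.digitChar 0 = '0' from rfl, if_neg (by decide : ¬('0' = '1'))]
        omega
      · rw [show Nat.digitChar 1 = '1' from rfl, if_pos rfl]
        omega

theorem pcA_bl (n : Nat) (hn : 0 < n) : pcA (bl n) = pc n := by
  induction n using Nat.strong_induction_on with
  | _ n ih =>
    by_cases h1 : n = 1
    · subst h1
      rw [bl_one, pc_one]
      simp [pcA]
    · rw [bl_step n (by omega), pcA_append, ih (n / 2) (by omega) (by omega),
        pc_rec n (by omega)]
      rcases Nat.mod_two_eq_zero_or_one n with h | h <;> rw [h]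
      · rw [show Nat.digitChar 0 = '0' from rfl, if_neg (by decide : ¬('0' = '1'))]
        push_cast
        omega
      · rw [show Nat.digitChar 1 = '1' from rfl, if_pos rfl]
        push_cast
        omega

theorem Spop_one : Spop 1 = 1 := by
  simp [Spop, Finset.sum_range_succ, pc_zero, pc_one]

theorem psi_bl (n : Nat) (hn : 0 < n) : (loopA (bl n) (0, 0)).1 = Spop n := by
  induction n using Nat.strong_induction_on with
  | _ n ih =>
    by_cases h1 : n = 1
    · subst h1
      rw [bl_one, Spop_one]
      simp [loopA]
    · rw [bl_step n (by omega),
        loopA_append _ (bl_ne (n / 2) (by omega)) _,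
        vl_bl (n / 2) (by omega), pcA_bl (n / 2) (by omega),
        ih (n / 2) (by omega) (by omega)]
      have hn2 : n = 2 * (n / 2) + n % 2 := by omega
      conv_rhs => rw [hn2]
      rw [Spop_step (n / 2) (n % 2) (by omega)]
      rcases Nat.mod_two_eq_zero_or_one n with h | h <;> rw [h]
      · rw [show Nat.digitChar 0 = '0' from rfl, if_neg (by decide : ¬('0' = '1'))]
        push_cast
        ring
      · rw [show Nat.digitChar 1 = '1' from rfl, if_pos rfl]
        push_cast
        ring

theorem bl_getLast (n : Nat) (hn : 0 < n) : (bl n).getLast? = some (Nat.digitChar (n % 2)) := by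
  unfold bl
  rw [List.getLast?_reverse, List.head?_map,
    Nat.digits_def' (by norm_num : 1 < 2) hn]
  rfl

theorem Spop_zero : Spop 0 = 0 := by
  simp [Spop, pc_zero]

theorem count_eq_Spop (n : Nat) : count (n : Int) = Spop n := by
  by_cases hn : n = 0
  · subst hn
    rw [Spop_zero]
    simp only [count, PySem.Int.toList_pyBin]
    decide
  · have hn' : 0 < n := by omega
    have hbin : (PySem.Int.pyBin (n : Int)).toList.drop 2 = bl n := by
      rw [PySem.Int.toList_pyBin]
      unfold PySem.Int.toBinChars0b
      rw [if_neg (by omega : ¬((n : Int) < 0))]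
      simp only [List.drop_succ_cons, List.drop_zero, Int.toNat_natCast]
      exact toDigits_eq n hn'
    simp only [count, hbin]
    rw [fold_eq_gA (bl n)]
    rw [PySem.List.pyGetD_neg_one (bl n) ' ' (bl_ne n hn')]
    have hlast : (bl n).getLast (bl_ne n hn') = Nat.digitChar (n % 2) := by
      have h1 := bl_getLast n hn'
      rw [List.getLast?_eq_some_getLast (bl_ne n hn')] at h1
      exact Option.some.inj h1
    rw [hlast]
    have hpsi := psi_bl n hn'
    rw [loopA_merge (bl n) (bl_ne n hn') (0, 0)] at hpsi
    rw [bl_getLast n hn'] at hpsi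
    rcases Nat.mod_two_eq_zero_or_one n with h | h <;> rw [h] at hpsi ⊢
    · rw [show Nat.digitChar 0 = '0' from rfl] at hpsi ⊢
      rw [if_neg (by decide : ¬(some '0' = some '1'))] at hpsi
      rw [show (PySem.Int.ofChars? ['0']).getD 0 = 0 from by decide]
      simpa using hpsi
    · rw [show Nat.digitChar 1 = '1' from rfl] at hpsi ⊢
      rw [if_pos rfl] at hpsi
      rw [show (PySem.Int.ofChars? ['1']).getD 0 = 1 from by decide]
      simpa using hpsi

-- ----- B side -----

theorem g_succ (M e : Nat) : g (M + 1) e = g M e + M / 2 ^ e % 2 := by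
  have hP1 : 1 ≤ 2 ^ e := Nat.one_le_two_pow
  have hQ : 2 ^ (e + 1) = 2 * 2 ^ e := by ring
  obtain ⟨q, r, hM, hrlt⟩ : ∃ q r, M = 2 * 2 ^ e * q + r ∧ r < 2 * 2 ^ e :=
    ⟨M / (2 * 2 ^ e), M % (2 * 2 ^ e), (Nat.div_add_mod M (2 * 2 ^ e)).symm,
      Nat.mod_lt _ (by omega)⟩
  have hbit : M / 2 ^ e % 2 = r / 2 ^ e := by
    have h2 : r / 2 ^ e < 2 := by
      rw [Nat.div_lt_iff_lt_mul (by omega)]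
      omega
    rw [hM, show 2 * 2 ^ e * q + r = 2 ^ e * (2 * q) + r from by ring,
      Nat.mul_add_div (by omega), Nat.add_comm, Nat.add_mul_mod_self_left,
      Nat.mod_eq_of_lt h2]
  have hdiv0 : M / (2 * 2 ^ e) = q := by
    rw [hM, Nat.mul_add_div (by omega), Nat.div_eq_of_lt hrlt, Nat.add_zero]
  have hmod0 : M % (2 * 2 ^ e) = r := by
    rw [hM, Nat.mul_add_mod, Nat.mod_eq_of_lt hrlt]
  unfold g
  rw [hQ, hbit, hdiv0, hmod0]
  by_cases hlt : r + 1 < 2 * 2 ^ e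
  · have hM1 : M + 1 = 2 * 2 ^ e * q + (r + 1) := by omega
    have hdiv : (M + 1) / (2 * 2 ^ e) = q := by
      rw [hM1, Nat.mul_add_div (by omega), Nat.div_eq_of_lt hlt, Nat.add_zero]
    have hmod : (M + 1) % (2 * 2 ^ e) = r + 1 := by
      rw [hM1, Nat.mul_add_mod, Nat.mod_eq_of_lt hlt]
    rw [hdiv, hmod]
    by_cases hPr : 2 ^ e ≤ r
    · have hb : r / 2 ^ e = 1 := Nat.div_eq_of_lt_le (by omega) (by omega)
      rw [hb]
      omega
    · have hb : r / 2 ^ e = 0 := Nat.div_eq_of_lt (by omega)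
      rw [hb]
      omega
  · have hr2 : r + 1 = 2 * 2 ^ e := by omega
    have hexp2 : 2 * 2 ^ e * (q + 1) = 2 * 2 ^ e * q + 2 * 2 ^ e := by ring
    have hM1 : M + 1 = 2 * 2 ^ e * (q + 1) := by omega
    have hdiv : (M + 1) / (2 * 2 ^ e) = q + 1 := by
      rw [hM1, Nat.mul_div_cancel_left _ (by omega : 0 < 2 * 2 ^ e)]
    have hmod : (M + 1) % (2 * 2 ^ e) = 0 := by
      rw [hM1, Nat.mul_mod_right]
    rw [hdiv, hmod]
    have hb : r / 2 ^ e = 1 := Nat.div_eq_of_lt_le (by omega) (by omega)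
    have hexp : (q + 1) * 2 ^ e = q * 2 ^ e + 2 ^ e := by ring
    rw [hb, hexp]
    omega

theorem g_zero_of_le (M e : Nat) (h : M ≤ 2 ^ e) : g M e = 0 := by
  have hP1 : 1 ≤ 2 ^ e := Nat.one_le_two_pow
  have hQ : 2 ^ (e + 1) = 2 * 2 ^ e := by ring
  unfold g
  rw [hQ, Nat.div_eq_of_lt (by omega), Nat.mod_eq_of_lt (by omega)]
  omega

theorem altGo_eq (n : Nat) : ∀ (k i : Nat) (total : Int), (n : Int) < 2 ^ (i + k) →
    altGo (n : Int) i total = total + ∑ j ∈ Finset.range k, (g (n + 1) (i + j) : Int) := by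
  intro k
  induction k with
  | zero =>
    intro i total h
    rw [altGo]
    rw [dif_neg (by rw [Nat.add_zero] at h; omega)]
    simp
  | succ k ih =>
    intro i total h
    rw [altGo]
    by_cases hle : (2 : Int) ^ i ≤ (n : Int)
    · rw [dif_pos hle]
      rw [ih (i + 1) _ (by rw [show (i + 1) + k = i + (k + 1) from by omega]; exact h)]
      have hterm : PySem.Int.floordiv ((n : Int) + 1) (2 ^ (i + 1)) * 2 ^ i
          + max 0 (PySem.Int.mod ((n : Int) + 1) (2 ^ (i + 1)) - 2 ^ i) = (g (n + 1) i : Int) := by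
        have e1 : ((n : Int) + 1) = ((n + 1 : Nat) : Int) := by push_cast; ring
        have e2 : ((2 : Int) ^ (i + 1)) = ((2 ^ (i + 1) : Nat) : Int) := by push_cast; ring
        have e3 : ((2 : Int) ^ i) = ((2 ^ i : Nat) : Int) := by push_cast; ring
        rw [e1, e2, e3, PySem.Int.floordiv_natCast, PySem.Int.mod_natCast]
        unfold g
        have hmax : max (0 : Int) ((((n + 1) % 2 ^ (i + 1) : Nat) : Int) - ((2 ^ i : Nat) : Int))
            = (((n + 1) % 2 ^ (i + 1) - 2 ^ i : Nat) : Int) := by omega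
        rw [hmax]
        exact_mod_cast rfl
      have hre : ∑ j ∈ Finset.range k, (g (n + 1) (i + (j + 1)) : Int)
          = ∑ j ∈ Finset.range k, (g (n + 1) ((i + 1) + j) : Int) :=
        Finset.sum_congr rfl (fun j _ => by rw [show i + (j + 1) = (i + 1) + j from by omega])
      rw [Finset.sum_range_succ', hre]
      have h0 : (g (n + 1) (i + 0) : Int) = (g (n + 1) i : Int) := by norm_num
      linarith [hterm, h0]
    · rw [dif_neg hle]
      have hsum : ∑ j ∈ Finset.range (k + 1), (g (n + 1) (i + j) : Int) = 0 := by
        apply Finset.sum_eq_zero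
        intro j _
        have h1 : (n : Int) < ((2 ^ i : Nat) : Int) := by push_cast; omega
        have h2 : n < 2 ^ i := by exact_mod_cast h1
        have h3 : 2 ^ i ≤ 2 ^ (i + j) := Nat.pow_le_pow_right (by omega) (by omega)
        rw [g_zero_of_le _ _ (by omega)]
        simp
      rw [hsum, add_zero]

theorem bitsum (B : Nat) : ∀ M : Nat, M < 2 ^ B →
    ∑ e ∈ Finset.range B, ((M / 2 ^ e % 2 : Nat) : Int) = (pc M : Int) := by
  induction B with
  | zero =>
    intro M h
    have hM : M = 0 := by simpa using h
    subst hM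
    simp [pc_zero]
  | succ B ih =>
    intro M h
    rw [Finset.sum_range_succ']
    have h2 : ∑ e ∈ Finset.range B, ((M / 2 ^ (e + 1) % 2 : Nat) : Int)
        = ∑ e ∈ Finset.range B, ((M / 2 / 2 ^ e % 2 : Nat) : Int) :=
      Finset.sum_congr rfl (fun e _ => by
        rw [Nat.div_div_eq_div_mul, show 2 * 2 ^ e = 2 ^ (e + 1) from by ring])
    have hp : 2 ^ (B + 1) = 2 * 2 ^ B := by ring
    rw [h2, ih (M / 2) (by omega)]
    by_cases hM : M = 0
    · subst hM
      simp [pc_zero]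
    · rw [pc_rec M (by omega)]
      rw [pow_zero, Nat.div_one]
      push_cast
      ring

theorem sumg (B m : Nat) (h : m < 2 ^ B) :
    ∑ j ∈ Finset.range B, (g (m + 1) j : Int) = Spop m := by
  induction m with
  | zero =>
    rw [Spop_zero]
    apply Finset.sum_eq_zero
    intro j _
    rw [g_zero_of_le 1 j Nat.one_le_two_pow]
    simp
  | succ m ih =>
    have hstep : ∑ j ∈ Finset.range B, (g (m + 1 + 1) j : Int)
        = ∑ j ∈ Finset.range B, ((g (m + 1) j : Int) + ((m + 1) / 2 ^ j % 2 : Nat)) :=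
      Finset.sum_congr rfl (fun j _ => by rw [g_succ (m + 1) j]; push_cast; ring)
    rw [hstep, Finset.sum_add_distrib, ih (by omega), bitsum B (m + 1) h, Spop_succ]

theorem count_alt_eq_Spop (n : Nat) : count_alt (n : Int) = Spop n := by
  unfold count_alt
  have h1 : n < 2 ^ (n + 1) := by
    have h2 := Nat.lt_two_pow_self (n := n)
    have h3 : (2 : Nat) ^ n ≤ 2 ^ (n + 1) := Nat.pow_le_pow_right (by omega) (by omega)
    omega
  have hb : (n : Int) < 2 ^ (0 + (n + 1)) := by
    rw [Nat.zero_add]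
    exact_mod_cast h1
  rw [altGo_eq n (n + 1) 0 0 hb]
  have hz : ∑ j ∈ Finset.range (n + 1), (g (n + 1) (0 + j) : Int)
      = ∑ j ∈ Finset.range (n + 1), (g (n + 1) j : Int) :=
    Finset.sum_congr rfl (fun j _ => by rw [Nat.zero_add])
  rw [hz, sumg (n + 1) n h1, zero_add]

-- ===== VERDICT (by name: the statement is the Claim_ definition above) =====
theorem count_spec : Claim_equal_count := by
  intro num _ hpre
  unfold Spec_count
  have h : num = ((num.toNat : Nat) : Int) := (Int.toNat_of_nonneg hpre).symm
  rw [h, count_eq_Spop, count_alt_eq_Spop]
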